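-- pv_equiv track=rewrite | github.com/adpena/molt | src/molt/stdlib/warnings.py | _tokenize_pattern
-- ===== SOURCE A (Python) =====
-- def _tokenize_pattern(pattern: str) -> list[tuple[tuple[str, bool], bool]]:
--     tokens: list[tuple[tuple[str, bool], bool]] = []
--     idx = 0
--     while idx < len(pattern):
--         ch = pattern[idx]
--         literal = False
--         if ch == "\\" and idx + 1 < len(pattern):
--             idx += 1
--             ch = pattern[idx]
--             literal = True
--         is_wildcard = (ch == ".") and not literal
--         star = False
--         if not literal and idx + 1 < len(pattern) and pattern[idx + 1] == "*":
--             star = True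
--             idx += 1
--         tokens.append(((ch, is_wildcard), star))
--         idx += 1
--     return tokens
-- ===== SOURCE B (Python) =====
-- def _tokenize_pattern(pattern: str) -> list[tuple[tuple[str, bool], bool]]:
--     # Pass 1: resolve backslash escapes into (char, literal) atoms.
--     atoms: list[tuple[str, bool]] = []
--     i = 0
--     n = len(pattern)
--     while i < n:
--         if pattern[i] == "\\" and i + 1 < n:
--             atoms.append((pattern[i + 1], True))
--             i += 2
--         else:
--             atoms.append((pattern[i], False))
--             i += 1
--     # Pass 2: fold atoms into tokens, absorbing a following unescaped star.
--     tokens: list[tuple[tuple[str, bool], bool]] = []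
--     j = 0
--     m = len(atoms)
--     while j < m:
--         ch, lit = atoms[j]
--         star = False
--         if not lit and j + 1 < m and atoms[j + 1] == ("*", False):
--             star = True
--             j += 1
--         tokens.append(((ch, ch == "." and not lit), star))
--         j += 1
--     return tokens
-- ===== Notes on version B (the rewrite author's own statement) =====
-- stated objective: alternative
-- what changed: Replaces A's single-pass index loop with lookahead into the raw pattern by a two-pass decomposition: pass 1 resolves backslash escapes into a list of (char, literal) atoms, pass 2 folds that atom list into tokens, absorbing a following unescaped star atom.
import Mathlib
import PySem

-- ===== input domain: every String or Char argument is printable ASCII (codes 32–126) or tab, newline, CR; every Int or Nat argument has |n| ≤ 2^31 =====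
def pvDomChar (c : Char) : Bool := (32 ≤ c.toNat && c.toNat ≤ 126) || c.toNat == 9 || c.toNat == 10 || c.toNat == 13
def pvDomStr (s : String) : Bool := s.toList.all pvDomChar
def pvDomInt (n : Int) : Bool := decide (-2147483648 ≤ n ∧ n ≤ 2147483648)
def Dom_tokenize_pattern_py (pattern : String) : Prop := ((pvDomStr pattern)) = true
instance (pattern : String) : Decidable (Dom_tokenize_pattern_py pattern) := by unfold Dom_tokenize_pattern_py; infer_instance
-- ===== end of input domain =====

-- B replaces A's single-pass index/lookahead tokenizer by a two-pass decomposition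
-- (escape-resolution into atoms, then star-folding over the atom list); objective: alternative.

-- ===== PORT A =====
-- A's while loop over idx, recursion on the remaining suffix of the pattern;
-- branches in A's order: escape consume, then star lookahead on the raw next char.
def tokenizeA : List Char → List ((String × Bool) × Bool)
  | [] => []
  | c :: rest =>
    if c = '\\' ∧ rest ≠ [] then
      -- literal := true: is_wildcard false, star check suppressed
      match rest with
      | c2 :: rest2 => ((String.mk [c2], false), false) :: tokenizeA rest2
      | [] => []
    else
      match rest with
      | c2 :: rest2 =>
        if c2 = '*' then ((String.mk [c], c == '.'), true) :: tokenizeA rest2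
        else ((String.mk [c], c == '.'), false) :: tokenizeA (c2 :: rest2)
      | [] => [((String.mk [c], c == '.'), false)]

def tokenize_pattern_py (pattern : String) : List ((String × Bool) × Bool) :=
  tokenizeA pattern.toList

-- ===== PORT B =====
-- pass 1 of Source B: resolve escapes into (char, literal) atoms
def atomsOf : List Char → List (Char × Bool)
  | [] => []
  | c :: rest =>
    if c = '\\' ∧ rest ≠ [] then
      match rest with
      | c2 :: rest2 => (c2, true) :: atomsOf rest2
      | [] => []
    else (c, false) :: atomsOf rest

-- pass 2 of Source B: fold atoms into tokens, absorbing a following unescaped star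
def foldAtoms : List (Char × Bool) → List ((String × Bool) × Bool)
  | [] => []
  | (c, lit) :: rest =>
    if ¬lit ∧ rest.head? = some ('*', false) then
      ((String.mk [c], c == '.' && !lit), true) :: foldAtoms rest.tail
    else
      ((String.mk [c], c == '.' && !lit), false) :: foldAtoms rest
termination_by l => l.length
decreasing_by
  all_goals simp [List.length_tail]

def tokenize_pattern_py_alt (pattern : String) : List ((String × Bool) × Bool) :=
  foldAtoms (atomsOf pattern.toList)

-- ===== PRECONDITION & SPEC =====
def Spec_tokenize_pattern_py (pattern : String) (out : List ((String × Bool) × Bool)) : Prop := out = tokenize_pattern_py_alt pattern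
instance (pattern : String) (out : List ((String × Bool) × Bool)) : Decidable (Spec_tokenize_pattern_py pattern out) := by unfold Spec_tokenize_pattern_py; infer_instance

-- ===== CLAIM (what is proved, stated in full; the proofs are below) =====
def Claim_equal_tokenize_pattern_py : Prop := ∀ (pattern : String), Dom_tokenize_pattern_py pattern → Spec_tokenize_pattern_py pattern (tokenize_pattern_py pattern)

-- ===== LEMMAS AND PROOFS =====

lemma tokenizeA_eq_fold : ∀ (n : ℕ) (l : List Char), l.length ≤ n →
    tokenizeA l = foldAtoms (atomsOf l) := by
  intro n
  induction n with
  | zero =>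
    intro l h
    have : l = [] := List.eq_nil_of_length_eq_zero (Nat.le_zero.mp h)
    subst this
    simp [tokenizeA.eq_def, atomsOf.eq_def, foldAtoms.eq_def]
  | succ n ih =>
    intro l h
    match l with
    | [] => simp [tokenizeA.eq_def, atomsOf.eq_def, foldAtoms.eq_def]
    | c :: rest =>
      rw [tokenizeA.eq_def, atomsOf.eq_def]
      simp only []
      by_cases hesc : c = '\\' ∧ rest ≠ []
      · rw [if_pos hesc, if_pos hesc]
        match rest, hesc.2 with
        | c2 :: rest2, _ =>
          simp only []
          rw [foldAtoms.eq_def]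
          simp only []
          rw [if_neg (by simp)]
          rw [ih rest2 (by simpa using Nat.le_of_succ_le_succ (Nat.le_of_succ_le h))]
          simp
      · rw [if_neg hesc, if_neg hesc]
        match rest with
        | [] =>
          simp [foldAtoms.eq_def, atomsOf.eq_def]
        | c2 :: rest2 =>
          have hlen2 : rest2.length ≤ n := by
            simpa using Nat.le_of_succ_le_succ (Nat.le_of_succ_le h)
          have hlen1 : (c2 :: rest2).length ≤ n := Nat.le_of_succ_le_succ h
          simp only []
          by_cases hstar : c2 = '*'
          · subst hstar
            rw [if_pos rfl]
            have ha : atomsOf ('*' :: rest2) = ('*', false) :: atomsOf rest2 := by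
              rw [atomsOf.eq_def]; simp
            rw [ha, foldAtoms.eq_def]
            simp only []
            rw [if_pos (by simp)]
            rw [ih rest2 hlen2]
            simp
          · rw [if_neg hstar]
            have hhead : (atomsOf (c2 :: rest2)).head? ≠ some ('*', false) := by
              by_cases h2 : c2 = '\\' ∧ rest2 ≠ []
              · match rest2, h2.2 with
                | c3 :: rest3, _ =>
                  rw [atomsOf.eq_def]
                  simp only []
                  rw [if_pos h2]
                  simp
              · rw [atomsOf.eq_def]
                simp only []
                rw [if_neg h2]
                simp [hstar]
            rw [foldAtoms.eq_def]
            simp only []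
            rw [if_neg (by simp [hhead])]
            rw [ih (c2 :: rest2) hlen1]
            simp

-- ===== VERDICT (by name: the statement is the Claim_ definition above) =====
theorem tokenize_pattern_py_spec : Claim_equal_tokenize_pattern_py := by
  intro pattern _
  unfold Spec_tokenize_pattern_py tokenize_pattern_py tokenize_pattern_py_alt
  exact tokenizeA_eq_fold pattern.toList.length pattern.toList le_rfl
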